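-- pv_equiv track=rewrite | github.com/nobodywasishere/MLCSim | MLCSim/configs.py | calcCellDeltaList
-- ===== SOURCE A (Python) =====
-- from typing import Dict, Generator, List, Tuple, Union
--
-- def calcCellDeltaList(cell: List[int]) -> List[int]:
--     """Calculates the list of step sizes for a cell
--
--     Args:
--         cell (list): List of bits in a cell (i.e. [0, 1, 2, 3])
--
--     Returns:
--         list: List of step sizes between levels in the cell
--     """
--     l = len(cell)
--     prev = 0
--     out: List[int] = []
--     for i in range(1, 2**l):
--         curr = 0
--         for idx, j in enumerate(list(bin(i)[2:].rjust(l, "0"))):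
--             curr += 2 ** cell[l - idx - 1] * int(j)
--         out.append(curr - prev)
--         prev = curr
--     return out
-- ===== SOURCE B (Python) =====
-- def calcCellDeltaList(cell):
--     """Step sizes between consecutive cell levels.
--
--     Instead of rebuilding each level value from the binary string of i
--     (O(l*2^l)), note that going from i-1 to i sets bit t (= number of
--     trailing zeros of i) and clears all bits below it, so the delta is
--     2**cell[t] minus the sum of 2**cell[k] for k < t.  With the powers and
--     their prefix sums precomputed this is O(2^l) total.
--     """
--     pows = [2 ** c for c in cell]
--     pre = []
--     s = 0
--     for p in pows:
--         pre.append(s)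
--         s += p
--     out = []
--     for i in range(1, 2 ** len(cell)):
--         x = i
--         t = 0
--         while x % 2 == 0:
--             x //= 2
--             t += 1
--         out.append(pows[t] - pre[t])
--     return out
-- ===== Notes on version B (the rewrite author's own statement) =====
-- stated objective: faster
-- what changed: Replaces the per-step rebuild of each level value from the binary string of i by a trailing-zeros/prefix-sum closed form for each delta (incrementing i sets bit t and clears the bits below it, so the delta is 2**cell[t] minus the sum of the lower powers), with the powers and their prefix sums precomputed once.
-- outside the precondition, e.g. on calcCellDeltaList([-1]): A returns [0.5], B returns [0.5]
import Mathlib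
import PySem

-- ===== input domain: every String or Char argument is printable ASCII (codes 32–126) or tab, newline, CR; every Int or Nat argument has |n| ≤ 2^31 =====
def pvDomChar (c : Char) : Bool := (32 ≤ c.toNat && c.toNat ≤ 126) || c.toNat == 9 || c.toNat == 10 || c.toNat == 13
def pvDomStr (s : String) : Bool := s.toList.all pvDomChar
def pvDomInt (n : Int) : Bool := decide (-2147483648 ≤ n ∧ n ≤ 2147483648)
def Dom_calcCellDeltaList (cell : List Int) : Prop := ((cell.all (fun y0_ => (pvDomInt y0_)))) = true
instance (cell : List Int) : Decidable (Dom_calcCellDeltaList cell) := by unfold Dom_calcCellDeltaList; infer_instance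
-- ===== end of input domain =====

-- B replaces the O(l) binary-string rebuild of each level value by a trailing-zeros /
-- prefix-sum closed form for each delta (objective: faster, O(l*2^l) → O(2^l)).

-- ===== PORT A =====
-- bin(i)[2:] for i ≥ 0 (the loop only calls it with i ≥ 1): MSB-first binary digits.
def pvBDigits (n : Nat) : List Char :=
  if n = 0 then [] else pvBDigits (n / 2) ++ [if n % 2 = 1 then '1' else '0']

def calcCellDeltaList (cell : List Int) : List Int :=
  let l := cell.length
  ((PySem.List.pyRange 1 (2 ^ l) 1).foldl (fun (st : Int × List Int) i =>
      -- list(bin(i)[2:].rjust(l, "0")); i ≥ 1 here, so i.toNat is exact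
      let padded := List.replicate (l - (pvBDigits i.toNat).length) '0' ++ pvBDigits i.toNat
      -- curr += 2 ** cell[l - idx - 1] * int(j); the index is always in range (idx < l),
      -- the exponent is ≥ 0 under Pre_ (so .toNat is exact there), and j ∈ {'0','1'}
      let curr := (PySem.List.enumerate padded 0).foldl (fun curr p =>
          curr + (2 : Int) ^ (PySem.List.pyGetD cell ((l : Int) - p.1 - 1) 0).toNat
                 * (if p.2 = '1' then (1 : Int) else 0)) 0
      (curr, st.2 ++ [curr - st.1])) ((0 : Int), ([] : List Int))).2

-- ===== PORT B =====
-- the while-loop 'x = i; t = 0; while x % 2 == 0: x //= 2; t += 1' (i ≥ 1, so it terminates)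
def pvTz (x : Nat) : Nat :=
  if x % 2 = 1 ∨ x = 0 then 0 else pvTz (x / 2) + 1
decreasing_by exact Nat.div_lt_self (Nat.pos_of_ne_zero (by omega)) (by omega)

def calcCellDeltaList_alt (cell : List Int) : List Int :=
  -- pows = [2 ** c for c in cell]; exponent ≥ 0 under Pre_, so .toNat is exact there
  let pows := cell.map (fun c => (2 : Int) ^ c.toNat)
  -- pre = []; s = 0; for p in pows: pre.append(s); s += p
  let pre := (pows.foldl (fun (st : List Int × Int) p => (st.1 ++ [st.2], st.2 + p))
                (([] : List Int), (0 : Int))).1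
  -- for i in range(1, 2**len(cell)): … out.append(pows[t] - pre[t]); i ≥ 1, t always in range
  (PySem.List.pyRange 1 (2 ^ cell.length) 1).foldl (fun out i =>
      out ++ [PySem.List.pyGetD pows ((pvTz i.toNat : Nat) : Int) 0
               - PySem.List.pyGetD pre ((pvTz i.toNat : Nat) : Int) 0]) []

-- ===== PRECONDITION & SPEC =====
-- Pre_ excludes cells containing a negative entry: there A (and B) compute 2**c with c < 0,
-- which are Python floats, so the returned list is not a value of the declared List[int] type.
def Pre_calcCellDeltaList (cell : List Int) : Prop := ∀ c ∈ cell, 0 ≤ c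
instance (cell : List Int) : Decidable (Pre_calcCellDeltaList cell) := by
  unfold Pre_calcCellDeltaList; infer_instance

def pvWitness_calcCellDeltaList : List Int := [0, 1, 2]

def Spec_calcCellDeltaList (cell : List Int) (out : List Int) : Prop := out = calcCellDeltaList_alt cell
instance (cell : List Int) (out : List Int) : Decidable (Spec_calcCellDeltaList cell out) := by unfold Spec_calcCellDeltaList; infer_instance

-- ===== CLAIM (what is proved, stated in full; the proofs are below) =====
def Claim_equal_calcCellDeltaList : Prop := ∀ (cell : List Int), Dom_calcCellDeltaList cell → Pre_calcCellDeltaList cell → Spec_calcCellDeltaList cell (calcCellDeltaList cell)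

-- ===== LEMMAS AND PROOFS =====

-- the common value function: pvG cell n = Σ_k bit_k(n) * 2^cell[k]
def pvG : List Int → Nat → Int
  | [], _ => 0
  | c :: cs, n => ((n % 2 : Nat) : Int) * (2 : Int) ^ c.toNat + pvG cs (n / 2)

theorem pvG_zero (cell : List Int) : pvG cell 0 = 0 := by
  induction cell with
  | nil => rfl
  | cons c cs ih => simp [pvG, ih]


-- LSB-first digits of n (no leading zeros)
def pvLsb (n : Nat) : List Char :=
  if n = 0 then [] else (if n % 2 = 1 then '1' else '0') :: pvLsb (n / 2)
decreasing_by exact Nat.div_lt_self (Nat.pos_of_ne_zero (by omega)) (by omega)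

-- LSB-first digits of n, padded/truncated to exactly l digits
def pvBits : Nat → Nat → List Char
  | 0, _ => []
  | l + 1, n => (if n % 2 = 1 then '1' else '0') :: pvBits l (n / 2)

-- Σ 2^c * bit over pairs of (cell entry, digit char)
def pvZ : List Int → List Char → Int
  | c :: cs, ch :: r => (2 : Int) ^ c.toNat * (if ch = '1' then (1 : Int) else 0) + pvZ cs r
  | _, _ => 0

def pvPre : List Int → Int → List Int
  | [], _ => []
  | p :: ps, s => s :: pvPre ps (s + p)

theorem pvBDigits_eq (n : Nat) : pvBDigits n = (pvLsb n).reverse := by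
  induction n using Nat.strong_induction_on with
  | _ n ih =>
    rw [pvBDigits, pvLsb]
    by_cases h : n = 0
    · simp [h]
    · simp only [h, if_false]
      rw [ih (n / 2) (Nat.div_lt_self (Nat.pos_of_ne_zero h) (by omega))]
      simp

theorem pvBits_length (l n : Nat) : (pvBits l n).length = l := by
  induction l generalizing n with
  | zero => rfl
  | succ l ih => simp [pvBits, ih]

theorem pvBits_zero (l : Nat) : pvBits l 0 = List.replicate l '0' := by
  induction l with
  | zero => rfl
  | succ l ih => simp [pvBits, ih, List.replicate_succ]

theorem pvLsb_pad (l : Nat) : ∀ n, n < 2 ^ l →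
    pvLsb n ++ List.replicate (l - (pvLsb n).length) '0' = pvBits l n := by
  induction l with
  | zero =>
    intro n hn
    have : n = 0 := by omega
    subst this
    rw [pvLsb]; simp [pvBits]
  | succ l ih =>
    intro n hn
    by_cases h : n = 0
    · subst h
      rw [pvLsb]; simp [pvBits_zero]
    · rw [pvLsb]
      simp only [h, if_false]
      have hlen : ((if n % 2 = 1 then '1' else '0') :: pvLsb (n / 2)).length
          = (pvLsb (n / 2)).length + 1 := by simp
      rw [hlen]
      have hdiv : n / 2 < 2 ^ l := by
        have : 2 ^ (l + 1) = 2 * 2 ^ l := by ring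
        omega
      have := ih (n / 2) hdiv
      simp only [pvBits]
      rw [List.cons_append]
      congr 1
      have hsub : l + 1 - ((pvLsb (n / 2)).length + 1) = l - (pvLsb (n / 2)).length := by omega
      rw [hsub]
      exact ih (n / 2) hdiv

theorem pvPadded_eq (l n : Nat) (hn : n < 2 ^ l) :
    List.replicate (l - (pvBDigits n).length) '0' ++ pvBDigits n = (pvBits l n).reverse := by
  rw [pvBDigits_eq]
  have : List.replicate (l - (pvLsb n).reverse.length) '0'
      = (List.replicate (l - (pvLsb n).length) '0').reverse := by simp
  rw [this, ← List.reverse_append, pvLsb_pad l n hn]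

theorem pvZ_append (x : Int) (y : Char) :
    ∀ (xs : List Int) (ys : List Char), xs.length = ys.length →
    pvZ (xs ++ [x]) (ys ++ [y])
      = pvZ xs ys + (2 : Int) ^ x.toNat * (if y = '1' then (1 : Int) else 0) := by
  intro xs
  induction xs with
  | nil =>
    intro ys h
    have : ys = [] := by
      cases ys with
      | nil => rfl
      | cons a b => simp at h
    subst this
    simp [pvZ]
  | cons c cs ih =>
    intro ys h
    cases ys with
    | nil => simp at h
    | cons ch r =>
      simp only [List.cons_append, pvZ]
      rw [ih r (by simpa using h)]
      ring

theorem pvZ_bits (cell : List Int) : ∀ n : Nat,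
    pvZ cell.reverse (pvBits cell.length n).reverse = pvG cell n := by
  induction cell with
  | nil => intro n; simp [pvZ, pvG]
  | cons c cs ih =>
    intro n
    simp only [List.length_cons, List.reverse_cons, pvBits, pvG]
    rw [pvZ_append c (if n % 2 = 1 then '1' else '0') cs.reverse (pvBits cs.length (n / 2)).reverse
        (by simp [pvBits_length])]
    rw [ih (n / 2)]
    have : (2 : Int) ^ c.toNat * (if (if n % 2 = 1 then '1' else '0') = '1' then (1 : Int) else 0)
        = ((n % 2 : Nat) : Int) * (2 : Int) ^ c.toNat := by
      rcases Nat.mod_two_eq_zero_or_one n with h | h <;> simp [h, mul_comm]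
    rw [this]
    ring

theorem pvInner (ds : List Int) : ∀ (r : List Char) (k : Nat) (a : Int),
    k + r.length = ds.length →
    (PySem.List.enumerate r (k : Int)).foldl (fun curr p =>
        curr + (2 : Int) ^ (PySem.List.pyGetD ds ((ds.length : Int) - p.1 - 1) 0).toNat
               * (if p.2 = '1' then (1 : Int) else 0)) a
      = a + pvZ (ds.take r.length).reverse r := by
  intro r
  induction r with
  | nil => intro k a h; simp [PySem.List.enumerate_nil, pvZ]
  | cons ch r ih =>
    intro k a h
    rw [PySem.List.enumerate_cons, List.foldl_cons]
    have hk1 : (k : Int) + 1 = ((k + 1 : Nat) : Int) := by push_cast; ring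
    rw [hk1, ih (k + 1) _ (by simp at h ⊢; omega)]
    have hidx : (ds.length : Int) - (k : Int) - 1 = ((r.length : Nat) : Int) := by
      simp at h; omega
    rw [hidx, PySem.List.pyGetD_natCast]
    have hlt : r.length < ds.length := by simp at h; omega
    rw [List.getD_eq_getElem ds 0 hlt]
    have htake : ds.take (ch :: r).length = ds.take r.length ++ [ds[r.length]] := by
      simp only [List.length_cons]
      rw [List.take_add_one]
      simp [List.getElem?_eq_getElem hlt]
    rw [htake, List.reverse_append]
    simp only [List.reverse_singleton, List.singleton_append, pvZ]
    ring

theorem pvCurr (cell : List Int) (n : Nat) (hn : n < 2 ^ cell.length) :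
    (PySem.List.enumerate
        (List.replicate (cell.length - (pvBDigits n).length) '0' ++ pvBDigits n) 0).foldl
      (fun curr p =>
        curr + (2 : Int) ^ (PySem.List.pyGetD cell ((cell.length : Int) - p.1 - 1) 0).toNat
               * (if p.2 = '1' then (1 : Int) else 0)) 0
      = pvG cell n := by
  rw [pvPadded_eq cell.length n hn]
  have h := pvInner cell ((pvBits cell.length n).reverse) 0 0 (by simp [pvBits_length])
  simp only [List.length_reverse, pvBits_length, List.take_length, Nat.cast_zero, zero_add] at h
  rw [pvZ_bits cell n] at h
  simpa using h

theorem pvPre_fold : ∀ (ps : List Int) (acc : List Int) (s : Int),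
    (ps.foldl (fun (st : List Int × Int) p => (st.1 ++ [st.2], st.2 + p)) (acc, s)).1
      = acc ++ pvPre ps s := by
  intro ps
  induction ps with
  | nil => intro acc s; simp [pvPre]
  | cons p ps ih => intro acc s; simp [pvPre, ih]

theorem pvPre_getD : ∀ (ps : List Int) (s : Int) (t : Nat), t < ps.length →
    (pvPre ps s).getD t 0 = s + (ps.take t).sum := by
  intro ps
  induction ps with
  | nil => intro s t h; simp at h
  | cons p ps ih =>
    intro s t h
    cases t with
    | zero => simp [pvPre]
    | succ t =>
      simp only [pvPre, List.getD_cons_succ, List.take_succ_cons, List.sum_cons]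
      rw [ih (s + p) t (by simpa using h)]
      ring

theorem pvTz_lt (l : Nat) : ∀ n, 0 < n → n < 2 ^ l → pvTz n < l := by
  induction l with
  | zero => intro n h1 h2; omega
  | succ l ih =>
    intro n h1 h2
    rw [pvTz]
    by_cases h : n % 2 = 1 ∨ n = 0
    · simp [h]
    · simp only [h, if_false]
      have : pvTz (n / 2) < l := by
        apply ih
        · omega
        · have : 2 ^ (l + 1) = 2 * 2 ^ l := by ring
          omega
      omega

theorem pvMain (cell : List Int) : ∀ n : Nat, 0 < n → n < 2 ^ cell.length →
    pvG cell n - pvG cell (n - 1)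
      = (cell.map (fun c => (2 : Int) ^ c.toNat)).getD (pvTz n) 0
        - (((cell.map (fun c => (2 : Int) ^ c.toNat)).take (pvTz n)).sum) := by
  induction cell with
  | nil => intro n h1 h2; simp at h2; omega
  | cons c cs ih =>
    intro n h1 h2
    rcases Nat.mod_two_eq_zero_or_one n with hpar | hpar
    · -- n even, n ≥ 2
      have hn2 : 2 ≤ n := by omega
      have htz : pvTz n = pvTz (n / 2) + 1 := by
        rw [pvTz]; simp [hpar]; omega
      have hm1 : (n - 1) % 2 = 1 := by omega
      have hm1d : (n - 1) / 2 = n / 2 - 1 := by omega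
      have hdiv : n / 2 < 2 ^ cs.length := by
        have : 2 ^ (cs.length + 1) = 2 * 2 ^ cs.length := by ring
        simp at h2; omega
      have := ih (n / 2) (by omega) hdiv
      simp only [pvG, hpar, hm1, hm1d, htz, List.map_cons, List.getD_cons_succ,
        List.take_succ_cons, List.sum_cons]
      push_cast
      omega
    · -- n odd
      have htz : pvTz n = 0 := by rw [pvTz]; simp [hpar]
      have hm1 : (n - 1) % 2 = 0 := by omega
      have hm1d : (n - 1) / 2 = n / 2 := by omega
      simp only [pvG, hpar, hm1, hm1d, htz, List.map_cons, List.getD_cons_zero,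
        List.take_zero, List.sum_nil]
      push_cast
      ring


theorem pvOuter (cell : List Int) : ∀ (k : Nat), 1 ≤ k → k ≤ 2 ^ cell.length →
    (PySem.List.pyRange 1 (k : Int) 1).foldl (fun (st : Int × List Int) i =>
        let padded := List.replicate (cell.length - (pvBDigits i.toNat).length) '0' ++ pvBDigits i.toNat
        let curr := (PySem.List.enumerate padded 0).foldl (fun curr p =>
            curr + (2 : Int) ^ (PySem.List.pyGetD cell ((cell.length : Int) - p.1 - 1) 0).toNat
                   * (if p.2 = '1' then (1 : Int) else 0)) 0
        (curr, st.2 ++ [curr - st.1])) ((0 : Int), ([] : List Int))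
    = (pvG cell (k - 1),
       (PySem.List.pyRange 1 (k : Int) 1).foldl (fun out i =>
          out ++ [PySem.List.pyGetD (cell.map fun c => (2 : Int) ^ c.toNat) ((pvTz i.toNat : Nat) : Int) 0
                  - PySem.List.pyGetD (pvPre (cell.map fun c => (2 : Int) ^ c.toNat) 0) ((pvTz i.toNat : Nat) : Int) 0]) []) := by
  intro k hk
  induction k, hk using Nat.le_induction with
  | base =>
    intro _
    rw [show ((1 : Nat) : Int) = 1 by norm_num,
        PySem.List.pyRange_one_eq_nil (by norm_num)]
    simp [pvG_zero]
  | succ n hn ih =>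
    intro hle
    have hcast : ((n + 1 : Nat) : Int) = (n : Int) + 1 := by push_cast; ring
    rw [hcast, PySem.List.pyRange_one_succ_right (by exact_mod_cast hn),
        List.foldl_append, List.foldl_append, List.foldl_cons, List.foldl_cons,
        List.foldl_nil, List.foldl_nil, ih (by omega)]
    have hnat : ((n : Int)).toNat = n := Int.toNat_natCast n
    have hlt : n < 2 ^ cell.length := by omega
    have hcurr := pvCurr cell n hlt
    have ht : pvTz n < cell.length := pvTz_lt cell.length n (by omega) hlt
    have hmap : (cell.map fun c => (2 : Int) ^ c.toNat).length = cell.length := by simp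
    have hB : PySem.List.pyGetD (cell.map fun c => (2 : Int) ^ c.toNat) ((pvTz n : Nat) : Int) 0
            - PySem.List.pyGetD (pvPre (cell.map fun c => (2 : Int) ^ c.toNat) 0) ((pvTz n : Nat) : Int) 0
        = pvG cell n - pvG cell (n - 1) := by
      rw [PySem.List.pyGetD_natCast, PySem.List.pyGetD_natCast]
      rw [pvPre_getD (cell.map fun c => (2 : Int) ^ c.toNat) 0 (pvTz n) (by omega)]
      rw [pvMain cell n (by omega) hlt]
      ring
    simp only [hnat]
    rw [hcurr, hB]
    simp

-- ===== VERDICT (by name: the statement is the Claim_ definition above) =====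
theorem calcCellDeltaList_spec : Claim_equal_calcCellDeltaList := by
  intro cell _ _
  show calcCellDeltaList cell = calcCellDeltaList_alt cell
  unfold calcCellDeltaList calcCellDeltaList_alt
  simp only [pvPre_fold, List.nil_append]
  have h := pvOuter cell (2 ^ cell.length) Nat.one_le_two_pow le_rfl
  have hc : ((2 ^ cell.length : Nat) : Int) = (2 : Int) ^ cell.length := by push_cast; ring
  rw [hc] at h
  rw [h]
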